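-- pv_equiv track=rewrite | github.com/glwlg/X-bot | src/platforms/discord/formatter.py | markdown_to_discord_compat
-- ===== SOURCE A (Python) =====
-- def markdown_to_discord_compat(text: str) -> str:
--     """
--     Convert generic Markdown to Discord-friendly Markdown.
--
--     Features:
--     - Tables: Converts Markdown tables to Code Blocks (to define columns)
--     """
--     if not text:
--         return ""
--
--     # Detect Markdown Tables
--     # Pattern: Line with | ... | followed by |---|---|
--     # We will try to detect a block of table and wrap it in a code block if it is not already in one.
--
--     lines = text.split("\n")
--     in_table = False
--     table_buffer = []
--     output_lines = []
--
--     # Helper to flush table buffer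
--     def flush_table():
--         if not table_buffer:
--             return
--         # Naive: Just wrap in code block.
--         # Better: We could try to align columns using `tabulate` but we don't want extra deps.
--         # Just wrapping in code block preserves the piped structure which monospaced font makes readable.
--         output_lines.append("```")
--         output_lines.extend(table_buffer)
--         output_lines.append("```")
--         table_buffer.clear()
--
--     for i, line in enumerate(lines):
--         striped = line.strip()
--         is_table_row = striped.startswith("|") and striped.endswith("|")
--
--         if is_table_row:
--             # Check if this is likely a table part
--             if not in_table:
--                 # Look ahead to see if next line is splitter |---|
--                 if i + 1 < len(lines):
--                     next_line = lines[i + 1].strip()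
--                     if next_line.startswith("|") and "-" in next_line:
--                         in_table = True
--
--             if in_table:
--                 table_buffer.append(line)
--             else:
--                 output_lines.append(line)
--         else:
--             if in_table:
--                 in_table = False
--                 flush_table()
--             output_lines.append(line)
--
--     # Flush at end
--     if in_table:
--         flush_table()
--
--     return "\n".join(output_lines)
-- ===== SOURCE B (Python) =====
-- def markdown_to_discord_compat(text: str) -> str:
--     """Run-grabbing rewrite: an explicit index loop that, on seeing a table
--     header (a |...| row whose next line is a |---style separator), consumes the
--     whole run of consecutive table rows at once and wraps it in a code block,
--     instead of A's per-line in_table state machine."""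
--     lines = text.split("\n")
--     n = len(lines)
--     out = []
--     i = 0
--     while i < n:
--         line = lines[i]
--         s = line.strip()
--         if s.startswith("|") and s.endswith("|") and i + 1 < n:
--             nxt = lines[i + 1].strip()
--             if nxt.startswith("|") and "-" in nxt:
--                 out.append("```")
--                 while i < n:
--                     t = lines[i].strip()
--                     if not (t.startswith("|") and t.endswith("|")):
--                         break
--                     out.append(lines[i])
--                     i += 1
--                 out.append("```")
--                 continue
--         out.append(line)
--         i += 1
--     return "\n".join(out)
-- ===== Notes on version B (the rewrite author's own statement) =====
-- stated objective: alternative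
-- what changed: Replaces A's per-line in_table flag + table_buffer state machine with an explicit index loop that, at a detected table header, grabs the whole run of consecutive table rows in an inner loop and emits the code block immediately.
import Mathlib
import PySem

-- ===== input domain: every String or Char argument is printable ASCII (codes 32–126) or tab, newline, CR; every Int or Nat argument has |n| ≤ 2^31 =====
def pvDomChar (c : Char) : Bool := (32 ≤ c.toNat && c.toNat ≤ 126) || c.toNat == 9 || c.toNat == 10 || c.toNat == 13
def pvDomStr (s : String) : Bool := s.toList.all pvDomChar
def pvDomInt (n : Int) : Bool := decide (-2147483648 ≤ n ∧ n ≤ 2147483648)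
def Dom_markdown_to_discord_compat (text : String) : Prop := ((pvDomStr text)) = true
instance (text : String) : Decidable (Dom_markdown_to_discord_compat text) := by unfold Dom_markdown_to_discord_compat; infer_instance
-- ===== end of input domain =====

-- B replaces A's cross-iteration in_table/table_buffer state machine by explicit run-grabbing
-- at each detected table header (alternative decomposition, same O(n) cost).
-- Both ports work on the List Char level (PySem.Chars), exact for str on the stated ASCII domain.

-- ===== PORT A =====
-- flush_table: wrap the buffered table lines in ``` fences (no-op on an empty buffer)
def pvFlushA (buf out : List (List Char)) : List (List Char) :=
  if buf = [] then out else (out ++ [['`','`','`']]) ++ buf ++ [['`','`','`']]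

-- the 'for i, line in enumerate(lines)' loop; lines[i+1] is the head of the remaining list
def pvLoopA : List (List Char) → Bool → List (List Char) → List (List Char) → List (List Char)
  | [], in_table, buf, out => if in_table then pvFlushA buf out else out
  | line :: rest, in_table, buf, out =>
    let striped := PySem.Chars.strip line
    let is_row := PySem.Chars.startswith striped ['|'] && PySem.Chars.endswith striped ['|']
    if is_row then
      let in_table' :=
        if !in_table then
          match rest with
          | [] => in_table
          | nl :: _ =>
            let ns := PySem.Chars.strip nl
            if PySem.Chars.startswith ns ['|'] && PySem.Chars.isIn ['-'] ns then true
            else in_table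
        else in_table
      if in_table' then pvLoopA rest in_table' (buf ++ [line]) out
      else pvLoopA rest in_table' buf (out ++ [line])
    else
      if in_table then pvLoopA rest false [] (pvFlushA buf out ++ [line])
      else pvLoopA rest in_table buf (out ++ [line])

def markdown_to_discord_compat (text : String) : String :=
  if text = "" then ""
  else String.ofList (PySem.Chars.join ['\n']
    (pvLoopA (PySem.Chars.splitOn text.toList ['\n']) false [] []))

-- ===== PORT B =====
-- inner 'while i < n: ... collect consecutive table rows': returns (run, remainder)
def pvGrab : List (List Char) → List (List Char) × List (List Char)
  | [] => ([], [])
  | l :: r =>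
    let t := PySem.Chars.strip l
    if PySem.Chars.startswith t ['|'] && PySem.Chars.endswith t ['|'] then
      let p := pvGrab r
      (l :: p.1, p.2)
    else ([], l :: r)

-- termination measure for the outer loop: the remainder never grows
theorem pvGrab_snd_length_le : ∀ xs : List (List Char), (pvGrab xs).2.length ≤ xs.length := by
  intro xs
  induction xs with
  | nil => simp [pvGrab]
  | cons l r ih =>
    simp only [pvGrab]
    split
    · exact Nat.le_succ_of_le ih
    · simp

-- the outer 'while i < n' loop of B, one step per position; at a header the whole
-- run is grabbed (the first inner-while iteration necessarily re-appends the current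
-- line, which is already known to be a table row, so it is written explicitly)
def pvGoB : List (List Char) → List (List Char)
  | [] => []
  | [line] => [line]
  | line :: nl :: r =>
    let s := PySem.Chars.strip line
    if PySem.Chars.startswith s ['|'] && PySem.Chars.endswith s ['|'] then
      let ns := PySem.Chars.strip nl
      if PySem.Chars.startswith ns ['|'] && PySem.Chars.isIn ['-'] ns then
        ['`','`','`'] :: line :: (pvGrab (nl :: r)).1
          ++ ['`','`','`'] :: pvGoB (pvGrab (nl :: r)).2
      else line :: pvGoB (nl :: r)
    else line :: pvGoB (nl :: r)
termination_by lines => lines.length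
decreasing_by
  · exact Nat.lt_succ_of_le (pvGrab_snd_length_le (nl :: r))
  · simp
  · simp

def markdown_to_discord_compat_alt (text : String) : String :=
  String.ofList (PySem.Chars.join ['\n'] (pvGoB (PySem.Chars.splitOn text.toList ['\n'])))

-- ===== PRECONDITION & SPEC =====
def Spec_markdown_to_discord_compat (text : String) (out : String) : Prop := out = markdown_to_discord_compat_alt text
instance (text : String) (out : String) : Decidable (Spec_markdown_to_discord_compat text out) := by unfold Spec_markdown_to_discord_compat; infer_instance

-- ===== CLAIM (what is proved, stated in full; the proofs are below) =====
def Claim_equal_markdown_to_discord_compat : Prop := ∀ (text : String), Dom_markdown_to_discord_compat text → Spec_markdown_to_discord_compat text (markdown_to_discord_compat text)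

-- ===== LEMMAS AND PROOFS =====

-- unfolding lemmas for B's well-founded recursion, one per branch
theorem pvGoB_nil : pvGoB [] = [] := by simp [pvGoB]

theorem pvGoB_one (line : List Char) : pvGoB [line] = [line] := by simp [pvGoB]

theorem pvGoB_not_row (line nl : List Char) (r : List (List Char))
    (h : (PySem.Chars.startswith (PySem.Chars.strip line) ['|']
          && PySem.Chars.endswith (PySem.Chars.strip line) ['|']) = false) :
    pvGoB (line :: nl :: r) = line :: pvGoB (nl :: r) := by
  simp only [pvGoB, h]; simp

theorem pvGoB_row_no_sep (line nl : List Char) (r : List (List Char))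
    (hrow : (PySem.Chars.startswith (PySem.Chars.strip line) ['|']
             && PySem.Chars.endswith (PySem.Chars.strip line) ['|']) = true)
    (hsep : (PySem.Chars.startswith (PySem.Chars.strip nl) ['|']
             && PySem.Chars.isIn ['-'] (PySem.Chars.strip nl)) = false) :
    pvGoB (line :: nl :: r) = line :: pvGoB (nl :: r) := by
  simp only [pvGoB, hrow, hsep]; simp

theorem pvGoB_row_sep (line nl : List Char) (r : List (List Char))
    (hrow : (PySem.Chars.startswith (PySem.Chars.strip line) ['|']
             && PySem.Chars.endswith (PySem.Chars.strip line) ['|']) = true)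
    (hsep : (PySem.Chars.startswith (PySem.Chars.strip nl) ['|']
             && PySem.Chars.isIn ['-'] (PySem.Chars.strip nl)) = true) :
    pvGoB (line :: nl :: r)
      = ['`','`','`'] :: line :: (pvGrab (nl :: r)).1
          ++ ['`','`','`'] :: pvGoB (pvGrab (nl :: r)).2 := by
  simp only [pvGoB, hrow, hsep]; simp

-- A's state machine agrees with B's run-grabbing recursion, both out of a table
-- (in_table = false, empty buffer) and inside one (in_table = true, nonempty buffer).
theorem pvMain : ∀ (n : Nat) (lines : List (List Char)), lines.length ≤ n →
    (∀ out, pvLoopA lines false [] out = out ++ pvGoB lines) ∧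
    (∀ buf out, buf ≠ [] →
      pvLoopA lines true buf out
        = out ++ ['`','`','`'] :: (buf ++ (pvGrab lines).1)
            ++ ['`','`','`'] :: pvGoB (pvGrab lines).2) := by
  intro n
  induction n with
  | zero =>
    intro lines h
    have hnil : lines = [] := List.length_eq_zero_iff.mp (Nat.le_zero.mp h)
    subst hnil
    refine ⟨fun out => by simp [pvLoopA, pvGoB_nil], fun buf out hb => ?_⟩
    simp [pvLoopA, pvGoB_nil, pvGrab, pvFlushA, hb]
  | succ n ih =>
    intro lines h
    cases lines with
    | nil =>
      refine ⟨fun out => by simp [pvLoopA, pvGoB_nil], fun buf out hb => ?_⟩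
      simp [pvLoopA, pvGoB_nil, pvGrab, pvFlushA, hb]
    | cons line rest =>
      have hr : rest.length ≤ n := by simpa using Nat.lt_succ_iff.mp (by simpa using h)
      have IH := ih rest hr
      cases hrow : (PySem.Chars.startswith (PySem.Chars.strip line) ['|']
                    && PySem.Chars.endswith (PySem.Chars.strip line) ['|']) with
      | true =>
        constructor
        · intro out
          cases rest with
          | nil =>
            simp [pvLoopA, hrow, pvGoB_one]
          | cons nl r =>
            cases hsep : (PySem.Chars.startswith (PySem.Chars.strip nl) ['|']
                          && PySem.Chars.isIn ['-'] (PySem.Chars.strip nl)) with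
            | true =>
              have h2 := IH.2 [line] out (by simp)
              rw [pvGoB_row_sep line nl r hrow hsep]
              trans (pvLoopA (nl :: r) true [line] out)
              · simp [pvLoopA, hrow, hsep]
              · rw [h2]; simp
            | false =>
              have h1 := IH.1 (out ++ [line])
              rw [pvGoB_row_no_sep line nl r hrow hsep]
              trans (pvLoopA (nl :: r) false [] (out ++ [line]))
              · simp [pvLoopA, hrow, hsep]
              · rw [h1]; simp
        · intro buf out hb
          have h2 := IH.2 (buf ++ [line]) out (by simp)
          trans (pvLoopA rest true (buf ++ [line]) out)
          · simp [pvLoopA, hrow]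
          · rw [h2]
            simp only [pvGrab, hrow]
            simp
      | false =>
        have hgo : pvGoB (line :: rest) = line :: pvGoB rest := by
          cases rest with
          | nil => simp [pvGoB_one, pvGoB_nil]
          | cons nl r => exact pvGoB_not_row line nl r hrow
        constructor
        · intro out
          have h1 := IH.1 (out ++ [line])
          rw [hgo]
          trans (pvLoopA rest false [] (out ++ [line]))
          · simp [pvLoopA, hrow]
          · rw [h1]; simp
        · intro buf out hb
          have h1 := IH.1 (pvFlushA buf out ++ [line])
          trans (pvLoopA rest false [] (pvFlushA buf out ++ [line]))
          · simp [pvLoopA, hrow]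
          · rw [h1]
            simp only [pvGrab, hrow]
            simp only [pvFlushA, if_neg hb]
            simp [hgo]

-- ===== VERDICT (by name: the statement is the Claim_ definition above) =====
theorem markdown_to_discord_compat_spec : Claim_equal_markdown_to_discord_compat := by
  intro text _
  unfold Spec_markdown_to_discord_compat markdown_to_discord_compat markdown_to_discord_compat_alt
  by_cases he : text = ""
  · subst he
    rw [if_pos rfl]
    rw [show PySem.Chars.splitOn "".toList ['\n'] = [[]] from by decide, pvGoB_one]
    rw [show PySem.Chars.join ['\n'] [[]] = [] from by decide]
  · simp only [he, if_false]
    rw [(pvMain (PySem.Chars.splitOn text.toList ['\n']).length _ le_rfl).1 []]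
    simp
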